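-- pv_equiv track=rewrite | github.com/mtekman/galaxy | linkage_converter/res.py | __generateHeaders
-- ===== SOURCE A (Python) =====
-- marker_order = [ "rs123", "rs111111119", "rs15441", "rs1" ]
--
-- def __generateHeaders(marker_order, npad_left = 10):
--     max_len = -1
--     markerpadd = []
--     for marker in marker_order:
--         nmark = len(marker)
--         if nmark > max_len:
--             max_len = nmark
--
--     # paddleft
--     for marker in marker_order:
--         markerpadd.append(("%%-%ds" % max_len) % marker)
--
--     # transpose
--     buffer_left = ("%%%ds" % npad_left) % " "
--     return '\n'.join([buffer_left + "  ".join(x) for x in zip(*markerpadd)][::-1])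
-- ===== SOURCE B (Python) =====
-- def __generateHeaders(marker_order, npad_left=10):
--     max_len = max((len(m) for m in marker_order), default=0)
--     buffer_left = ("%%%ds" % npad_left) % " "
--     lines = []
--     for i in range(max_len - 1, -1, -1):
--         lines.append(buffer_left + "  ".join(m[i] if i < len(m) else " " for m in marker_order))
--     return "\n".join(lines)
-- ===== Notes on version B (the rewrite author's own statement) =====
-- stated objective: simpler
-- what changed: Replaces the padded-string list plus zip-transpose-then-reverse with a single directly indexed walk over column indices from max_len-1 down to 0, picking each character (or a space) straight from the original markers; the left margin keeps the same %-format expression.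
import Mathlib
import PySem

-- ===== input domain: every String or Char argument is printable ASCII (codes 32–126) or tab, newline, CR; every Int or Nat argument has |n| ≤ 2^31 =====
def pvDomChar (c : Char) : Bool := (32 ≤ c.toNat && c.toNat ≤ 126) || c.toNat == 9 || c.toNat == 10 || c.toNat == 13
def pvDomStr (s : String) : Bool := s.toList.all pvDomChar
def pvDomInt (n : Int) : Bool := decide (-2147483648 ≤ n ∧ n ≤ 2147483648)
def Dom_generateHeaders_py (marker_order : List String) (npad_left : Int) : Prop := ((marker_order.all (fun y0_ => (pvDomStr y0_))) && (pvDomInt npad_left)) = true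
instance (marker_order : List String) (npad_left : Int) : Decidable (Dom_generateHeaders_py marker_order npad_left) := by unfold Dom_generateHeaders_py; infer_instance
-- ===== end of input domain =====

-- B replaces A's pad-all-markers + zip-transpose + reverse with one directly indexed walk
-- over column indices max_len-1 .. 0; same output, simpler decomposition (no speed claim).

-- ===== PORT A =====

-- "%-Ws" % s : left-justify s in width W (Python %-formatting, W from "%%-%ds" % max_len)
def pyFmtLjust (w : Int) (s : List Char) : List Char :=
  if (s.length : Int) < w then s ++ List.replicate (w - (s.length : Int)).toNat ' ' else s

-- "%Ws" % s : right-justify if W ≥ 0, left-justify in width |W| if W < 0 (CPython rule)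
def pyFmtJust (w : Int) (s : List Char) : List Char :=
  if w < 0 then pyFmtLjust (-w) s
  else if (s.length : Int) < w then List.replicate (w - (s.length : Int)).toNat ' ' ++ s else s

-- zip(*ls) over equal-typed char lists: rows of heads while every list is nonempty
def pyZipStar (ls : List (List Char)) : List (List Char) :=
  if h : ls ≠ [] ∧ ∀ l ∈ ls, l ≠ [] then
    ls.map (fun l => l.headD ' ') :: pyZipStar (ls.map List.tail)
  else []
termination_by (ls.headD []).length
decreasing_by
  obtain ⟨h1, h2⟩ := h
  match ls, h1 with
  | a :: t, _ =>
    have ha : a ≠ [] := h2 a (by simp)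
    have hp := List.length_pos_of_ne_nil ha
    simp only [List.attach_cons, List.map_cons, List.headD_cons, List.length_tail]
    omega

def generateHeaders_py (marker_order : List String) (npad_left : Int) : String :=
  let max_len : Int := marker_order.foldl
    (fun acc m => if ((m.toList.length : Int)) > acc then (m.toList.length : Int) else acc) (-1)
  let markerpadd : List (List Char) :=
    marker_order.foldl (fun acc m => acc ++ [pyFmtLjust max_len m.toList]) []
  let buffer_left : List Char := pyFmtJust npad_left [' ']
  String.ofList (PySem.Chars.join ['\n']
    (((pyZipStar markerpadd).map
        (fun x => buffer_left ++ PySem.Chars.join [' ', ' '] (x.map (fun c => [c])))).reverse))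

-- ===== PORT B =====

def generateHeaders_py_alt (marker_order : List String) (npad_left : Int) : String :=
  let max_len : Nat := (marker_order.map (fun m => m.toList.length)).foldl Nat.max 0
  let buffer_left : List Char := pyFmtJust npad_left [' ']   -- ("%%%ds" % npad_left) % " "
  String.ofList (PySem.Chars.join ['\n']
    ((PySem.List.pyRange ((max_len : Int) - 1) (-1) (-1)).map
      (fun i => buffer_left ++ PySem.Chars.join [' ', ' ']
        (marker_order.map
          (fun m => if i < (m.toList.length : Int) then [m.toList.getD i.toNat ' '] else [' '])))))

-- ===== PRECONDITION & SPEC =====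
def Spec_generateHeaders_py (marker_order : List String) (npad_left : Int) (out : String) : Prop := out = generateHeaders_py_alt marker_order npad_left
instance (marker_order : List String) (npad_left : Int) (out : String) : Decidable (Spec_generateHeaders_py marker_order npad_left out) := by unfold Spec_generateHeaders_py; infer_instance

-- ===== CLAIM (what is proved, stated in full; the proofs are below) =====
def Claim_equal_generateHeaders_py : Prop := ∀ (marker_order : List String) (npad_left : Int), Dom_generateHeaders_py marker_order npad_left → Spec_generateHeaders_py marker_order npad_left (generateHeaders_py marker_order npad_left)

-- ===== LEMMAS AND PROOFS =====

-- A's int max-fold from a Nat start equals B's Nat max-fold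
theorem maxfold_cast (ms : List String) (a : Nat) :
    ms.foldl (fun acc m => if ((m.toList.length : Int)) > acc then (m.toList.length : Int) else acc) (a : Int)
      = ((ms.map (fun m => m.toList.length)).foldl Nat.max a : Nat) := by
  induction ms generalizing a with
  | nil => simp
  | cons m t ih =>
    simp only [List.foldl_cons, List.map_cons]
    have : (if ((m.toList.length : Int)) > (a : Int) then (m.toList.length : Int) else (a : Int))
        = ((Nat.max a m.toList.length : Nat) : Int) := by
      simp only [Nat.max_def]
      split_ifs <;> omega
    rw [this, ih]

-- the Nat max-fold bounds every length and the seed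
theorem maxfold_ge (ms : List String) (a : Nat) :
    a ≤ (ms.map (fun m => m.toList.length)).foldl Nat.max a ∧
    ∀ m ∈ ms, m.toList.length ≤ (ms.map (fun m => m.toList.length)).foldl Nat.max a := by
  induction ms generalizing a with
  | nil => simp
  | cons x t ih =>
    obtain ⟨h1, h2⟩ := ih (Nat.max a x.toList.length)
    refine ⟨le_trans (Nat.le_max_left _ _) h1, ?_⟩
    intro m hm
    rcases List.mem_cons.mp hm with rfl | hm
    · exact le_trans (Nat.le_max_right _ _) h1
    · exact h2 m hm

theorem pyFmtLjust_eq_pad (s : List Char) (n : Nat) (h : s.length ≤ n) :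
    pyFmtLjust (n : Int) s = s ++ List.replicate (n - s.length) ' ' := by
  unfold pyFmtLjust
  by_cases hlt : s.length < n
  · rw [if_pos (by exact_mod_cast hlt)]
    congr 1
    congr 1
    omega
  · have he : s.length = n := by omega
    rw [if_neg (by exact_mod_cast hlt)]
    simp [he]

theorem getD_pad (s : List Char) (k j : Nat) :
    (s ++ List.replicate k ' ').getD j ' ' = if j < s.length then s.getD j ' ' else ' ' := by
  induction s generalizing j with
  | nil =>
    simp only [List.nil_append, List.length_nil]
    rw [if_neg (by omega)]
    by_cases hj : j < k
    · exact List.getD_replicate ' ' hj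
    · simp [List.getD_eq_getElem?_getD, hj]
  | cons c t ih =>
    cases j with
    | zero => simp
    | succ j => simpa using ih j

-- zip(*ls) on a nonempty list of lists all of length n is the list of columns
theorem pyZipStar_uniform (n : Nat) :
    ∀ ls : List (List Char), ls ≠ [] → (∀ l ∈ ls, l.length = n) →
    pyZipStar ls = (List.range n).map (fun j => ls.map (fun l => l.getD j ' ')) := by
  induction n with
  | zero =>
    intro ls hne hlen
    rw [pyZipStar]
    rw [dif_neg]
    · simp
    · rintro ⟨-, h2⟩
      obtain ⟨a, t, rfl⟩ := List.exists_cons_of_ne_nil hne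
      exact h2 a (by simp) (List.eq_nil_of_length_eq_zero (hlen a (by simp)))
  | succ n ih =>
    intro ls hne hlen
    have hnn : ∀ l ∈ ls, l ≠ [] := by
      intro l hl hnil
      have := hlen l hl
      simp [hnil] at this
    rw [pyZipStar, dif_pos ⟨hne, hnn⟩]
    rw [ih (ls.map List.tail) (by simpa using hne)
      (by intro l hl; simp at hl; obtain ⟨a, ha, rfl⟩ := hl
          have := hlen a ha; simp [List.length_tail]; omega)]
    rw [List.range_succ_eq_map, List.map_cons, List.map_map]
    congr 1
    · apply List.map_congr_left
      intro l hl
      obtain ⟨c, t, rfl⟩ := List.exists_cons_of_ne_nil (hnn l hl)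
      rfl
    · apply List.map_congr_left
      intro j _
      simp only [Function.comp, List.map_map]
      apply List.map_congr_left
      intro l hl
      obtain ⟨c, t, rfl⟩ := List.exists_cons_of_ne_nil (hnn l hl)
      rfl

theorem reverse_map_range {α : Type} (n : Nat) (f : Nat → α) :
    ((List.range n).map f).reverse = (List.range n).map (fun k => f (n - 1 - k)) := by
  rw [← List.map_reverse, List.range_eq_range', List.reverse_range', ← List.range_eq_range',
    List.map_map]
  apply List.map_congr_left
  intro k _
  simp

-- ===== VERDICT (by name: the statement is the Claim_ definition above) =====
theorem generateHeaders_py_spec : Claim_equal_generateHeaders_py := by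
  intro ms npad _
  unfold Spec_generateHeaders_py generateHeaders_py generateHeaders_py_alt
  cases ms with
  | nil =>
    simp only [List.foldl_nil, List.map_nil]
    rw [pyZipStar, dif_neg (by simp)]
    rw [show PySem.List.pyRange (((0:Nat):Int) - 1) (-1) (-1) = [] by
      rw [PySem.List.pyRange_neg_one]; norm_num]
    simp
  | cons m0 t =>
    dsimp only
    obtain ⟨n, hn⟩ : ∃ k, List.foldl Nat.max 0 (List.map (fun m => m.toList.length) (m0 :: t)) = k :=
      ⟨_, rfl⟩
    have hge : ∀ m ∈ m0 :: t, m.toList.length ≤ n := by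
      intro m hm
      rw [← hn]
      exact (maxfold_ge (m0 :: t) 0).2 m hm
    have hmax : (m0 :: t).foldl
        (fun acc m => if ((m.toList.length : Int)) > acc then (m.toList.length : Int) else acc) (-1)
        = (n : Int) := by
      simp only [List.foldl_cons]
      rw [show (if ((m0.toList.length : Int)) > (-1 : Int) then (m0.toList.length : Int) else (-1:Int))
            = ((m0.toList.length : Nat) : Int) by rw [if_pos (by omega)]]
      rw [maxfold_cast t m0.toList.length, ← hn]
      simp [List.map_cons, List.foldl_cons]
    rw [hmax, hn]
    -- markerpadd as a map of padded lists
    rw [PySem.List.foldl_append_singleton_eq_map, List.nil_append]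
    have hpad : (m0 :: t).map (fun m => pyFmtLjust (n : Int) m.toList)
        = (m0 :: t).map (fun m => m.toList ++ List.replicate (n - m.toList.length) ' ') := by
      apply List.map_congr_left
      intro m hm
      exact pyFmtLjust_eq_pad m.toList n (hge m hm)
    rw [hpad]
    -- transpose
    rw [pyZipStar_uniform n _ (by simp) (by
      intro l hl
      obtain ⟨a, ha, rfl⟩ := List.mem_map.mp hl
      have hla := hge a ha
      simp only [List.length_append, List.length_replicate]
      omega)]
    -- B's countdown range
    rw [show PySem.List.pyRange ((n : Int) - 1) (-1) (-1)
          = (List.range n).map (fun k : Nat => ((n : Int) - 1 - (k : Int))) by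
      rw [PySem.List.pyRange_neg_one,
        show ((((n : Int) - 1)) - (-1)).toNat = n by omega]]
    rw [List.map_map, List.map_map, reverse_map_range]
    congr 1
    apply congrArg
    apply List.map_congr_left
    intro k hk
    simp only [List.mem_range] at hk
    simp only [Function.comp]
    congr 1
    apply congrArg
    rw [List.map_map, List.map_map]
    apply List.map_congr_left
    intro m hm
    simp only [Function.comp]
    have hj : ((n : Int) - 1 - (k : Int)).toNat = n - 1 - k := by omega
    rw [getD_pad]
    by_cases hlen : n - 1 - k < m.toList.length
    · rw [if_pos hlen, if_pos (by omega), hj]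
    · rw [if_neg hlen, if_neg (by omega)]
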